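-- pv_equiv track=rewrite | github.com/msc94/coding_assistant | src/coding_assistant/history.py | _fix_invalid_history
-- ===== SOURCE A (Python) =====
-- def _fix_invalid_history(history: list) -> list:
--     """
--     Fixes an invalid history by removing trailing assistant messages with tool_calls
--     that are not followed by a tool message.
--     """
--     if not history:
--         return []
--
--     fixed_history = list(history)
--     while fixed_history:
--         last_message = fixed_history[-1]
--         if last_message["role"] == "assistant" and "tool_calls" in last_message:
--             fixed_history.pop()
--         else:
--             break
--     return fixed_history
-- ===== SOURCE B (Python) =====
-- def _fix_invalid_history(history: list) -> list:
--     """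
--     Fixes an invalid history by removing trailing assistant messages with tool_calls
--     that are not followed by a tool message.
--     """
--     keep = len(history)
--     while keep and history[keep - 1]["role"] == "assistant" and "tool_calls" in history[keep - 1]:
--         keep -= 1
--     return history[:keep]
-- ===== Notes on version B (the rewrite author's own statement) =====
-- stated objective: simpler
-- what changed: B computes the cut index by scanning indices backwards and returns a single slice history[:keep], instead of copying the list and repeatedly popping its last element.
import Mathlib
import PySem

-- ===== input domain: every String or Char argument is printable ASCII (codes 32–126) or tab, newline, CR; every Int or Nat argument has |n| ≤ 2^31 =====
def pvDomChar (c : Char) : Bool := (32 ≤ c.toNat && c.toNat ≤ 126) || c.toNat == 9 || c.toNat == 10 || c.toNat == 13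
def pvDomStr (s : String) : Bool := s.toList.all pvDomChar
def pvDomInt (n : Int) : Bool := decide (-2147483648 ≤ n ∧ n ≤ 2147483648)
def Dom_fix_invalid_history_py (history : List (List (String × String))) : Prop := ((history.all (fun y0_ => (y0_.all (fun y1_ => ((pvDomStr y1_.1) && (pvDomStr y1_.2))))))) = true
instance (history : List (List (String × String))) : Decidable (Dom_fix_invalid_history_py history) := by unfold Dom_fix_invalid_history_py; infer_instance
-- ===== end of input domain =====

-- B replaces A's copy-and-pop loop by computing the cut index backwards and returning one slice (simpler, no working-copy mutation).

-- the predicate both Pythons evaluate: m["role"] == "assistant" and "tool_calls" in m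
-- (a message, given as an association list, is read through PySem.Dict.ofList = Python dict construction)
def pvIsToolCallMsg (m : List (String × String)) : Bool :=
  ((PySem.Dict.ofList m).get? "role" == some "assistant") && (PySem.Dict.ofList m).contains "tool_calls"

-- ===== PORT A =====
-- the while loop: pop the last element while it satisfies the predicate, else break
def pvLoopA (l : List (List (String × String))) : List (List (String × String)) :=
  if h : l = [] then l
  else
    let last_message := l.getLast h
    if pvIsToolCallMsg last_message then pvLoopA l.dropLast else l
termination_by l.length
decreasing_by
  simpa using Nat.sub_lt (List.length_pos_iff.mpr h) Nat.one_pos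

def fix_invalid_history_py (history : List (List (String × String))) : List (List (String × String)) :=
  if history = [] then [] else pvLoopA history

-- ===== PORT B =====
-- while keep and P(history[keep-1]): keep -= 1
def pvKeep (history : List (List (String × String))) : Nat → Nat
  | 0 => 0
  | n + 1 => if pvIsToolCallMsg (history.getD n []) then pvKeep history n else n + 1

def fix_invalid_history_py_alt (history : List (List (String × String))) : List (List (String × String)) :=
  history.take (pvKeep history history.length)

-- ===== PRECONDITION & SPEC =====
-- Pre_ excludes exactly the inputs on which A raises KeyError: scanning from the end, the first
-- message that is not an assistant/tool_calls message lacks the "role" key (B raises there too).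
def Pre_fix_invalid_history_py (history : List (List (String × String))) : Prop :=
  ∀ i, i < history.length →
    (∀ j, j < history.length → i < j → pvIsToolCallMsg (history.getD j []) = true) →
    (PySem.Dict.ofList (history.getD i [])).contains "role" = true

instance (history : List (List (String × String))) : Decidable (Pre_fix_invalid_history_py history) := by
  unfold Pre_fix_invalid_history_py; infer_instance

def pvWitness_fix_invalid_history_py : (List (List (String × String))) :=
  [[("role", "user")], [("role", "assistant"), ("tool_calls", "[]")]]

def Spec_fix_invalid_history_py (history : List (List (String × String))) (out : List (List (String × String))) : Prop := out = fix_invalid_history_py_alt history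
instance (history : List (List (String × String))) (out : List (List (String × String))) : Decidable (Spec_fix_invalid_history_py history out) := by unfold Spec_fix_invalid_history_py; infer_instance

-- ===== CLAIM (what is proved, stated in full; the proofs are below) =====
def Claim_equal_fix_invalid_history_py : Prop := ∀ (history : List (List (String × String))), Dom_fix_invalid_history_py history → Pre_fix_invalid_history_py history → Spec_fix_invalid_history_py history (fix_invalid_history_py history)

-- ===== LEMMAS AND PROOFS =====

theorem pvKeep_append (t : List (List (String × String))) (x : List (String × String))
    (n : Nat) (hn : n ≤ t.length) : pvKeep (t ++ [x]) n = pvKeep t n := by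
  induction n with
  | zero => rfl
  | succ n ih =>
    have hlt : n < t.length := hn
    simp only [pvKeep, List.getD_append _ _ _ _ hlt, ih (Nat.le_of_lt hlt)]

theorem pvKeep_le (history : List (List (String × String))) (n : Nat) :
    pvKeep history n ≤ n := by
  induction n with
  | zero => exact Nat.le_refl 0
  | succ n ih =>
    simp only [pvKeep]
    split
    · exact Nat.le_succ_of_le ih
    · exact Nat.le_refl _

theorem pvLoopA_eq (l : List (List (String × String))) :
    pvLoopA l = l.take (pvKeep l l.length) := by
  induction l using List.reverseRecOn with
  | nil => simp [pvLoopA, pvKeep]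
  | append_singleton t x ih =>
    rw [pvLoopA]
    have hne : t ++ [x] ≠ [] := by simp
    simp only [hne, dite_false, List.getLast_append_singleton]
    have hlen : (t ++ [x]).length = t.length + 1 := by simp
    by_cases hp : pvIsToolCallMsg x
    · have hget : (t ++ [x]).getD t.length [] = x := by
        simp [List.getD_eq_getElem?_getD]
      rw [hlen]
      simp only [pvKeep, hget, hp, if_true, List.dropLast_concat,
        pvKeep_append t x t.length (Nat.le_refl _)]
      rw [ih]
      have := pvKeep_le t t.length
      rw [List.take_append_of_le_length this]
    · rw [hlen]
      simp [pvKeep, hp]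

-- ===== VERDICT (by name: the statement is the Claim_ definition above) =====
theorem fix_invalid_history_py_spec : Claim_equal_fix_invalid_history_py := by
  intro history _ _
  unfold Spec_fix_invalid_history_py fix_invalid_history_py fix_invalid_history_py_alt
  by_cases h : history = []
  · subst h; rfl
  · simp only [h, if_false]
    exact pvLoopA_eq history
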